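-- pv_equiv track=rewrite | github.com/Sandesh-Basnet/AuthFort-Sec | src/security/entropy.py | check_possibilities
-- ===== SOURCE A (Python) =====
-- import string
--
-- def check_possibilities(passcode):
--     '''Update the character pool according
--         to the charcter set used in passcode
--     '''
--     character_pool = 0
--     if any(c.islower() for c in passcode):
--         character_pool +=26
--     if any(c.isupper() for c in passcode):
--         character_pool +=26
--     if any(c.isdigit() for c in passcode):
--         character_pool += 10
--     if any(c in string.punctuation for c in passcode):
--         character_pool +=32
--     return character_pool
-- ===== SOURCE B (Python) =====
-- import string
--
-- def check_possibilities(passcode):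
--     '''Update the character pool according
--         to the charcter set used in passcode
--     '''
--     has_lower = has_upper = has_digit = has_punct = False
--     for c in passcode:
--         has_lower = has_lower or c.islower()
--         has_upper = has_upper or c.isupper()
--         has_digit = has_digit or c.isdigit()
--         has_punct = has_punct or c in string.punctuation
--     return 26 * has_lower + 26 * has_upper + 10 * has_digit + 32 * has_punct
-- ===== Notes on version B (the rewrite author's own statement) =====
-- stated objective: alternative
-- what changed: Replaces four separate any() generator scans over the passcode with one single-pass loop that accumulates four boolean flags and computes the pool size arithmetically at the end (single traversal, no generator overhead).
import Mathlib
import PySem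

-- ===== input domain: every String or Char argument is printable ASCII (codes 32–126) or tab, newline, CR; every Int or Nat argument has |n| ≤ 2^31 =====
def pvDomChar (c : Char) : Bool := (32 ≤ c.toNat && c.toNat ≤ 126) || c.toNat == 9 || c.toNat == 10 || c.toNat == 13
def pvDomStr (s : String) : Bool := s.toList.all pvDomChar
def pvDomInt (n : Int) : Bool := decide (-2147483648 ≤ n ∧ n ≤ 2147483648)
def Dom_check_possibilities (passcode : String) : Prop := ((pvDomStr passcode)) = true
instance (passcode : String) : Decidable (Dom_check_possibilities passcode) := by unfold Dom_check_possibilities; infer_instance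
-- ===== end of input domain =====

-- B replaces A's four any() scans with one single-pass loop over the passcode
-- accumulating four boolean flags; same value on every input (alternative decomposition).

-- string.punctuation, as a list of characters
def pvPunct : List Char := "!\"#$%&'()*+,-./:;<=>?@[\\]^_`{|}~".toList

-- ===== PORT A =====
def check_possibilities (passcode : String) : Int :=
  let character_pool : Int := 0
  let character_pool :=
    if passcode.toList.any (fun c => PySem.Chars.islower c) then character_pool + 26 else character_pool
  let character_pool :=
    if passcode.toList.any (fun c => PySem.Chars.isupper c) then character_pool + 26 else character_pool
  let character_pool :=
    if passcode.toList.any (fun c => PySem.Chars.isdigit c) then character_pool + 10 else character_pool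
  let character_pool :=
    if passcode.toList.any (fun c => pvPunct.contains c) then character_pool + 32 else character_pool
  character_pool

-- ===== PORT B =====
def check_possibilities_alt (passcode : String) : Int :=
  let flags := passcode.toList.foldl
    (fun (s : Bool × Bool × Bool × Bool) c =>
      (s.1 || PySem.Chars.islower c,
       s.2.1 || PySem.Chars.isupper c,
       s.2.2.1 || PySem.Chars.isdigit c,
       s.2.2.2 || pvPunct.contains c))
    (false, false, false, false)
  26 * (if flags.1 then (1 : Int) else 0) + 26 * (if flags.2.1 then (1 : Int) else 0)
    + 10 * (if flags.2.2.1 then (1 : Int) else 0) + 32 * (if flags.2.2.2 then (1 : Int) else 0)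

-- ===== PRECONDITION & SPEC =====
def Spec_check_possibilities (passcode : String) (out : Int) : Prop := out = check_possibilities_alt passcode
instance (passcode : String) (out : Int) : Decidable (Spec_check_possibilities passcode out) := by unfold Spec_check_possibilities; infer_instance

-- ===== CLAIM (what is proved, stated in full; the proofs are below) =====
def Claim_equal_check_possibilities : Prop := ∀ (passcode : String), Dom_check_possibilities passcode → Spec_check_possibilities passcode (check_possibilities passcode)

-- ===== LEMMAS AND PROOFS =====

theorem pv_fold_flags (xs : List Char) (a b c d : Bool) :
    xs.foldl
      (fun (s : Bool × Bool × Bool × Bool) ch =>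
        (s.1 || PySem.Chars.islower ch,
         s.2.1 || PySem.Chars.isupper ch,
         s.2.2.1 || PySem.Chars.isdigit ch,
         s.2.2.2 || pvPunct.contains ch))
      (a, b, c, d)
    = (a || xs.any (fun ch => PySem.Chars.islower ch),
       b || xs.any (fun ch => PySem.Chars.isupper ch),
       c || xs.any (fun ch => PySem.Chars.isdigit ch),
       d || xs.any (fun ch => pvPunct.contains ch)) := by
  induction xs generalizing a b c d with
  | nil => simp
  | cons x xs ih =>
    simp only [List.foldl_cons, List.any_cons, ih, Bool.or_assoc]

theorem check_possibilities_spec : Claim_equal_check_possibilities := by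
  intro passcode _
  show check_possibilities passcode = check_possibilities_alt passcode
  unfold check_possibilities check_possibilities_alt
  rw [pv_fold_flags]
  simp only [Bool.false_or]
  cases passcode.toList.any (fun ch => PySem.Chars.islower ch) <;>
    cases passcode.toList.any (fun ch => PySem.Chars.isupper ch) <;>
    cases passcode.toList.any (fun ch => PySem.Chars.isdigit ch) <;>
    cases passcode.toList.any (fun ch => pvPunct.contains ch) <;> simp
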